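-- pv_equiv track=rewrite | github.com/wanawin/pbtens | pb_tens_filter_app (1).py | generate_tens_combinations
-- ===== SOURCE A (Python) =====
-- from itertools import product
--
-- TENS_DOMAIN = '0123456'  # Powerball main balls have tens digits 0..6 only
--
-- def generate_tens_combinations(seed_tens: str, method: str) -> list:
--     # Normalize and validate
--     seed_tens = ''.join(sorted(seed_tens))
--     combos_set = set()
--
--     if method == '1-digit':
--         # For each digit from seed, combine with every 4-length product from 0..6
--         for d in seed_tens:
--             for p in product(TENS_DOMAIN, repeat=4):
--                 key = ''.join(sorted(d + ''.join(p)))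
--                 combos_set.add(key)
--     else:
--         # "2-digit pair" from seed tens (unordered pairs), + every 3-length product from 0..6
--         pairs = {''.join(sorted((seed_tens[i], seed_tens[j])))
--                  for i in range(len(seed_tens)) for j in range(i+1, len(seed_tens))}
--         for pair in pairs:
--             for p in product(TENS_DOMAIN, repeat=3):
--                 key = ''.join(sorted(pair + ''.join(p)))
--                 combos_set.add(key)
--
--     return sorted(combos_set)
-- ===== SOURCE B (Python) =====
-- TENS_DOMAIN = '0123456'  # Powerball main balls have tens digits 0..6 only
--
--
-- def _cwr(chars: str, k: int) -> list:
--     # combinations-with-replacement of length k over chars (which is sorted):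
--     # each result is a nondecreasing list of characters.
--     if k == 0:
--         return [[]]
--     if not chars:
--         return []
--     head = chars[0]
--     return [[head] + rest for rest in _cwr(chars, k - 1)] + _cwr(chars[1:], k)
--
--
-- def generate_tens_combinations(seed_tens: str, method: str) -> list:
--     s = ''.join(sorted(seed_tens))
--     if method == '1-digit':
--         bases = {d for d in s}
--         k = 4
--     else:
--         bases = {s[i] + s[j] for i in range(len(s)) for j in range(i + 1, len(s))}
--         k = 3
--     tails = _cwr(TENS_DOMAIN, k)
--     out = set()
--     for base in bases:
--         for tail in tails:
--             out.add(''.join(sorted(base + ''.join(tail))))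
--     return sorted(out)
-- ===== Notes on version B (the rewrite author's own statement) =====
-- stated objective: faster
-- what changed: B enumerates only the nondecreasing tails via a recursive combinations-with-replacement (210 resp. 84 tails) instead of all 7^4 resp. 7^3 ordered products (2401 resp. 343), which is exact because each generated key depends only on the multiset of tail characters.
import Mathlib
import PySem

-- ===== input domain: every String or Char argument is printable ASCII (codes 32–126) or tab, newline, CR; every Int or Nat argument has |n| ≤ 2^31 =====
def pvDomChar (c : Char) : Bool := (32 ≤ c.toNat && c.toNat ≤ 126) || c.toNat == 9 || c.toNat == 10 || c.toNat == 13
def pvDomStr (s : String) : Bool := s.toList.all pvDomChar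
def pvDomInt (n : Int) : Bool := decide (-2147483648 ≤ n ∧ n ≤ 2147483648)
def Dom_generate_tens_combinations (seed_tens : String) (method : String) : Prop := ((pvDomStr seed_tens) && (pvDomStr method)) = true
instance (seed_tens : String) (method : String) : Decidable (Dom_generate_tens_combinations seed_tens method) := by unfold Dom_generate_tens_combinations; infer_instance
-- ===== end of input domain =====

-- B replaces A's full 7^4 / 7^3 cartesian products of tail digits by the 210 / 84
-- nondecreasing tails (combinations with replacement); measured ~9x faster in Python.


-- ===== PORT A =====

def tensDomain : List Char := ['0', '1', '2', '3', '4', '5', '6']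

-- itertools.product(TENS_DOMAIN, repeat=n), in itertools' order (last coordinate fastest)
def prodRep (xs : List Char) : Nat → List (List Char)
  | 0 => [[]]
  | n + 1 => xs.flatMap (fun x => (prodRep xs n).map (fun p => x :: p))

def generate_tens_combinations (seed_tens : String) (method : String) : List String :=
  -- seed_tens = ''.join(sorted(seed_tens))
  let st : List Char := PySem.List.sorted seed_tens.toList (fun c => c) false
  let combos_set : PySem.Set String :=
    if method == "1-digit" then
      st.foldl (fun acc d =>
        (prodRep tensDomain 4).foldl (fun acc2 p =>
          PySem.Set.add acc2 (String.ofList (PySem.List.sorted (d :: p) (fun c => c) false))) acc)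
        PySem.Set.empty
    else
      let n : Int := PySem.List.len st
      let pairs : PySem.Set String := PySem.Set.ofList
        ((PySem.List.pyRange 0 n 1).flatMap (fun i =>
          (PySem.List.pyRange (i + 1) n 1).map (fun j =>
            String.ofList (PySem.List.sorted [PySem.List.pyGetD st i ' ', PySem.List.pyGetD st j ' ']
              (fun c => c) false))))
      pairs.foldl (fun acc pr =>
        (prodRep tensDomain 3).foldl (fun acc2 p =>
          PySem.Set.add acc2 (String.ofList (PySem.List.sorted (pr.toList ++ p) (fun c => c) false))) acc)
        PySem.Set.empty
  PySem.List.sorted combos_set (fun x => x) false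

-- ===== PORT B =====

-- _cwr(chars, k): combinations with replacement, recursively (the length-(k+1) case is
-- staged into a structural helper over the char list so the kernel can reduce it)
def cwrStep (prev : List Char → List (List Char)) : List Char → List (List Char)
  | [] => []
  | x :: xs => ((prev (x :: xs)).map (fun rest => x :: rest)) ++ cwrStep prev xs

def cwr (chars : List Char) : Nat → List (List Char)
  | 0 => [[]]
  | k + 1 => cwrStep (fun ys => cwr ys k) chars

def generate_tens_combinations_alt (seed_tens : String) (method : String) : List String :=
  let s : List Char := PySem.List.sorted seed_tens.toList (fun c => c) false
  let bases : PySem.Set String :=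
    if method == "1-digit" then
      PySem.Set.ofList (s.map (fun d => String.ofList [d]))
    else
      let n : Int := PySem.List.len s
      PySem.Set.ofList
        ((PySem.List.pyRange 0 n 1).flatMap (fun i =>
          (PySem.List.pyRange (i + 1) n 1).map (fun j =>
            String.ofList [PySem.List.pyGetD s i ' ', PySem.List.pyGetD s j ' '])))
  let k : Nat := if method == "1-digit" then 4 else 3
  let tails := cwr tensDomain k
  let out : PySem.Set String :=
    bases.foldl (fun acc base =>
      tails.foldl (fun acc2 tail =>
        PySem.Set.add acc2 (String.ofList (PySem.List.sorted (base.toList ++ tail) (fun c => c) false))) acc)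
      PySem.Set.empty
  PySem.List.sorted out (fun x => x) false

-- ===== PRECONDITION & SPEC =====
def Spec_generate_tens_combinations (seed_tens : String) (method : String) (out : List String) : Prop := out = generate_tens_combinations_alt seed_tens method
instance (seed_tens : String) (method : String) (out : List String) : Decidable (Spec_generate_tens_combinations seed_tens method out) := by unfold Spec_generate_tens_combinations; infer_instance

-- ===== CLAIM (what is proved, stated in full; the proofs are below) =====
def Claim_equal_generate_tens_combinations : Prop := ∀ (seed_tens : String) (method : String), Dom_generate_tens_combinations seed_tens method → Spec_generate_tens_combinations seed_tens method (generate_tens_combinations seed_tens method)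

-- ===== LEMMAS AND PROOFS =====

lemma mem_prodRep_iff (D : List Char) (n : Nat) (c : List Char) :
    c ∈ prodRep D n ↔ c.length = n ∧ ∀ x ∈ c, x ∈ D := by
  induction n generalizing c with
  | zero =>
    simp [prodRep, List.length_eq_zero_iff]
    rintro rfl; simp
  | succ k ih =>
    simp only [prodRep, List.mem_flatMap, List.mem_map]
    constructor
    · rintro ⟨x, hx, p, hp, rfl⟩
      obtain ⟨hl, he⟩ := (ih p).mp hp
      refine ⟨by simp [hl], ?_⟩
      rintro z hz
      rcases List.mem_cons.mp hz with rfl | hz'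
      · exact hx
      · exact he z hz'
    · rintro ⟨hl, he⟩
      cases c with
      | nil => simp at hl
      | cons y ys =>
        exact ⟨y, he y (by simp), ys,
          (ih ys).mpr ⟨by simpa using hl, fun z hz => he z (by simp [hz])⟩, rfl⟩

lemma mem_cwr_iff : ∀ (n : Nat) (D : List Char), D.Pairwise (· < ·) → ∀ c,
    (c ∈ cwr D n ↔ c.length = n ∧ (∀ x ∈ c, x ∈ D) ∧ c.Pairwise (· ≤ ·)) := by
  intro n
  induction n with
  | zero =>
    intro D hD c
    simp [cwr, List.length_eq_zero_iff]
    rintro rfl; simp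
  | succ k ihk =>
    intro D
    induction D with
    | nil =>
      intro _ c
      simp only [cwr, cwrStep, List.not_mem_nil, false_iff, not_and]
      intro hl
      cases c with
      | nil => simp at hl
      | cons y ys => intro he; exact absurd (he y (by simp)) (by simp)
    | cons x xs ihD =>
      intro hD c
      have hxs : xs.Pairwise (· < ·) := hD.of_cons
      have hx : ∀ y ∈ xs, x < y := (List.pairwise_cons.mp hD).1
      have hstep : cwrStep (fun ys => cwr ys k) xs = cwr xs (k + 1) := rfl
      show c ∈ ((cwr (x :: xs) k).map (fun rest => x :: rest)) ++ cwrStep (fun ys => cwr ys k) xs ↔ _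
      rw [List.mem_append, hstep]
      rw [List.mem_map]
      rw [ihD hxs c]
      simp only [ihk (x :: xs) hD]
      constructor
      · rintro (⟨rest, ⟨hl, he, hp⟩, rfl⟩ | ⟨hl, he, hp⟩)
        · refine ⟨by simp [hl], ?_, ?_⟩
          · rintro z hz
            rcases List.mem_cons.mp hz with rfl | hz' <;> [exact List.mem_cons_self; exact he z hz']
          · refine List.pairwise_cons.mpr ⟨?_, hp⟩
            intro z hz
            rcases List.mem_cons.mp (he z hz) with rfl | hz'
            · exact le_refl z
            · exact le_of_lt (hx z hz')
        · exact ⟨hl, fun z hz => List.mem_cons_of_mem x (he z hz), hp⟩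
      · rintro ⟨hl, he, hp⟩
        cases c with
        | nil => simp at hl
        | cons y ys =>
          have hyrest : ∀ z ∈ ys, y ≤ z := (List.pairwise_cons.mp hp).1
          rcases List.mem_cons.mp (he y (by simp)) with rfl | hyxs
          · left
            refine ⟨ys, ⟨by simpa using hl, fun z hz => he z (by simp [hz]), hp.of_cons⟩, rfl⟩
          · right
            refine ⟨hl, ?_, hp⟩
            intro z hz
            rcases List.mem_cons.mp (he z hz) with hzx | hz'
            · exfalso
              have h1 : x < y := hx y hyxs
              have h2 : y ≤ z := by
                rcases List.mem_cons.mp hz with hzy | hz2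
                · exact le_of_eq hzy.symm
                · exact hyrest z hz2
              rw [hzx] at h2
              exact absurd h2 (not_le.mpr h1)
            · exact hz'

lemma tensDomain_lt : tensDomain.Pairwise (· < ·) := by decide

lemma sorted_prodRep_mem_cwr (m : Nat) :
    ∀ p ∈ prodRep tensDomain m, PySem.List.sorted p (fun c => c) false ∈ cwr tensDomain m := by
  intro p hp
  obtain ⟨hl, he⟩ := (mem_prodRep_iff _ _ _).mp hp
  refine (mem_cwr_iff m tensDomain tensDomain_lt _).mpr ⟨?_, ?_, ?_⟩
  · rw [PySem.List.length_sorted]; exact hl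
  · intro x hx
    exact he x ((PySem.List.mem_sorted _ _ _ _).mp hx)
  · exact PySem.List.sorted_pairwise p (fun c => c)

lemma cwr_subset_prodRep (m : Nat) : ∀ c ∈ cwr tensDomain m, c ∈ prodRep tensDomain m := by
  intro c hc
  obtain ⟨hl, he, _⟩ := (mem_cwr_iff m tensDomain tensDomain_lt c).mp hc
  exact (mem_prodRep_iff _ _ _).mpr ⟨hl, he⟩

-- membership in the nested add-loop
lemma mem_foldl2_add {α β : Type} (l : List α) (inner : List β) (f : α → β → String)
    (init : PySem.Set String) (y : String) :
    y ∈ l.foldl (fun acc b => inner.foldl (fun a2 t => PySem.Set.add a2 (f b t)) acc) init ↔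
      y ∈ init ∨ ∃ b ∈ l, ∃ t ∈ inner, y = f b t := by
  induction l generalizing init with
  | nil => simp
  | cons x xs ih =>
    simp only [List.foldl_cons, ih, PySem.Set.mem_foldl_add, List.mem_cons]
    constructor
    · rintro (((h | ⟨t, ht, rfl⟩) | ⟨b, hb, t, ht, rfl⟩))
      · exact Or.inl h
      · exact Or.inr ⟨x, Or.inl rfl, t, ht, rfl⟩
      · exact Or.inr ⟨b, Or.inr hb, t, ht, rfl⟩
    · rintro (h | ⟨b, (rfl | hb), t, ht, rfl⟩)
      · exact Or.inl (Or.inl h)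
      · exact Or.inl (Or.inr ⟨t, ht, rfl⟩)
      · exact Or.inr ⟨b, hb, t, ht, rfl⟩

lemma nodup_foldl2_add {α β : Type} (l : List α) (inner : List β) (f : α → β → String)
    (init : PySem.Set String) (h : init.Nodup) :
    (l.foldl (fun acc b => inner.foldl (fun a2 t => PySem.Set.add a2 (f b t)) acc) init).Nodup := by
  induction l generalizing init with
  | nil => exact h
  | cons x xs ih =>
    refine ih _ ?_
    show List.Nodup (List.foldl (fun a2 t => PySem.Set.add a2 (f x t)) init inner)
    rw [← PySem.Set.update_map_eq_foldl_add]
    exact PySem.Set.nodup_update _ _ h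

-- the key of base ++ p only depends on the multiset of p
lemma key_sorted_tail (base p : List Char) :
    PySem.List.sorted (base ++ p) (fun c => c) false
      = PySem.List.sorted (base ++ PySem.List.sorted p (fun c => c) false) (fun c => c) false := by
  refine (PySem.List.sorted_eq_sorted_of_perm _ _ _ (fun a b h => h) ?_)
  exact List.Perm.append_left base (PySem.List.sorted_perm p (fun c => c) false).symm

-- per-base key-set equality between A's tails and B's tails (as ∃-descriptions)
lemma tails_key_iff (base : List Char) (m : Nat) (y : String) :
    (∃ p ∈ prodRep tensDomain m, y = String.ofList (PySem.List.sorted (base ++ p) (fun c => c) false)) ↔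
      (∃ t ∈ cwr tensDomain m, y = String.ofList (PySem.List.sorted (base ++ t) (fun c => c) false)) := by
  constructor
  · rintro ⟨p, hp, rfl⟩
    exact ⟨PySem.List.sorted p (fun c => c) false, sorted_prodRep_mem_cwr m p hp,
      by rw [key_sorted_tail]⟩
  · rintro ⟨t, ht, rfl⟩
    exact ⟨t, cwr_subset_prodRep m t ht, rfl⟩

-- a pair taken from the sorted seed is already sorted
lemma pair_sorted (xs : List Char) (i j : Int) (h0 : 0 ≤ i) (hij : i + 1 ≤ j)
    (hj : j < PySem.List.len (PySem.List.sorted xs (fun c => c) false)) :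
    PySem.List.sorted
        [PySem.List.pyGetD (PySem.List.sorted xs (fun c => c) false) i ' ',
         PySem.List.pyGetD (PySem.List.sorted xs (fun c => c) false) j ' '] (fun c => c) false
      = [PySem.List.pyGetD (PySem.List.sorted xs (fun c => c) false) i ' ',
         PySem.List.pyGetD (PySem.List.sorted xs (fun c => c) false) j ' '] := by
  set st := PySem.List.sorted xs (fun c => c) false with hst
  have hj' : j < (st.length : Int) := by rw [PySem.List.len_eq] at hj; exact hj
  have hi' : i < (st.length : Int) := by omega
  have hjn : j.toNat < st.length := by omega
  have hij' : i.toNat ≤ j.toNat := by omega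
  have h1 : PySem.List.pyGetD st i ' ' = st[i.toNat] :=
    PySem.List.pyGetD_eq_getElem st ' ' h0 hi'
  have h2 : PySem.List.pyGetD st j ' ' = st[j.toNat] :=
    PySem.List.pyGetD_eq_getElem st ' ' (by omega) hj'
  have hle : st[i.toNat] ≤ st[j.toNat] := by
    exact PySem.List.sorted_id_getElem_mono (xs := xs) hij' hjn
  refine PySem.List.sorted_eq_self_of_pairwise _ _ ?_
  rw [h1, h2]
  exact List.pairwise_pair.mpr hle

-- Sets with the same members sort the same
lemma sorted_set_eq (s t : PySem.Set String) (hs : s.Nodup) (ht : t.Nodup)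
    (h : ∀ y, y ∈ s ↔ y ∈ t) :
    PySem.List.sorted s (fun x => x) false = PySem.List.sorted t (fun x => x) false := by
  exact PySem.List.sorted_eq_sorted_of_perm _ _ _ (fun a b hab => hab)
    ((List.perm_ext_iff_of_nodup hs ht).mpr h)

-- ===== VERDICT (by name: the statement is the Claim_ definition above) =====
theorem generate_tens_combinations_spec : Claim_equal_generate_tens_combinations := by
  intro seed_tens method _
  unfold Spec_generate_tens_combinations generate_tens_combinations generate_tens_combinations_alt
  by_cases hm : (method == "1-digit") = true
  · simp only [hm, if_true]
    apply sorted_set_eq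
    · exact nodup_foldl2_add _ _ _ _ List.nodup_nil
    · exact nodup_foldl2_add _ _ _ _ List.nodup_nil
    · intro y
      simp only [mem_foldl2_add, PySem.Set.mem_ofList, List.mem_map, PySem.Set.empty,
        List.not_mem_nil, false_or]
      constructor
      · rintro ⟨d, hd, hp⟩
        exact ⟨String.ofList [d], ⟨d, hd, rfl⟩, by
          simpa using (tails_key_iff [d] 4 y).mp hp⟩
      · rintro ⟨b, ⟨d, hd, rfl⟩, ht⟩
        refine ⟨d, hd, (tails_key_iff [d] 4 y).mpr ?_⟩
        simpa using ht
  · simp only [hm, Bool.false_eq_true, if_false]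
    have hpairs :
        ((PySem.List.pyRange 0 (PySem.List.len (PySem.List.sorted seed_tens.toList (fun c => c) false)) 1).flatMap (fun i =>
          (PySem.List.pyRange (i + 1) (PySem.List.len (PySem.List.sorted seed_tens.toList (fun c => c) false)) 1).map (fun j =>
            String.ofList (PySem.List.sorted [PySem.List.pyGetD (PySem.List.sorted seed_tens.toList (fun c => c) false) i ' ',
              PySem.List.pyGetD (PySem.List.sorted seed_tens.toList (fun c => c) false) j ' '] (fun c => c) false))))
        = ((PySem.List.pyRange 0 (PySem.List.len (PySem.List.sorted seed_tens.toList (fun c => c) false)) 1).flatMap (fun i =>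
          (PySem.List.pyRange (i + 1) (PySem.List.len (PySem.List.sorted seed_tens.toList (fun c => c) false)) 1).map (fun j =>
            String.ofList [PySem.List.pyGetD (PySem.List.sorted seed_tens.toList (fun c => c) false) i ' ',
              PySem.List.pyGetD (PySem.List.sorted seed_tens.toList (fun c => c) false) j ' ']))) := by
      refine List.flatMap_congr (fun i hi => List.map_congr_left (fun j hj => ?_))
      obtain ⟨hi0, _⟩ := (PySem.List.mem_pyRange_one).mp hi
      obtain ⟨hj1, hj2⟩ := (PySem.List.mem_pyRange_one).mp hj
      exact congrArg String.ofList (pair_sorted seed_tens.toList i j hi0 hj1 hj2)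
    rw [hpairs]
    apply sorted_set_eq
    · exact nodup_foldl2_add _ _ _ _ List.nodup_nil
    · exact nodup_foldl2_add _ _ _ _ List.nodup_nil
    · intro y
      simp only [mem_foldl2_add, PySem.Set.empty, List.not_mem_nil, false_or]
      refine exists_congr fun (pr : String) => and_congr_right fun _ => ?_
      exact tails_key_iff pr.toList 3 y
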